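-- pv_equiv track=rewrite | github.com/ddrscott/golumn | golumn/typer.py | detect_columns
-- ===== SOURCE A (Python) =====
-- def detect_columns(rows):
--     if rows is None or len(rows) == 0:
--         return []
--     result = list()
--     for i, h in enumerate(rows[0]):
--         cells = [r[i] for r in rows if len(r) > i]
--         if are_ints(cells):
--             result.append('integer')
--         elif are_floats(cells):
--             result.append('numeric')
--         else:
--             result.append('text')
--     return result
--
-- def are_floats(items):
--     """
--     detect if all items are floats
--     """
--     for i in items:
--         try:
--             float(i) if i is not None and len(i) > 0 else None
--         except ValueError:
--             return False
--     return True
--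
-- def are_ints(items):
--     """
--     detect if all items are ints
--     """
--     for i in items:
--         try:
--             int(i) if i is not None and len(i) > 0 else None
--         except ValueError:
--             return False
--     return True
-- ===== SOURCE B (Python) =====
-- def detect_columns(rows):
--     if not rows:
--         return []
--     ncols = len(rows[0])
--     int_ok = [True] * ncols
--     float_ok = [True] * ncols
--     for r in rows:
--         for j in range(min(len(r), ncols)):
--             cell = r[j]
--             if cell is not None and len(cell) > 0:
--                 if int_ok[j]:
--                     try:
--                         int(cell)
--                     except ValueError:
--                         int_ok[j] = False
--                 if float_ok[j]:
--                     try: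
--                         float(cell)
--                     except ValueError:
--                         float_ok[j] = False
--     return ['integer' if i else 'numeric' if f else 'text'
--             for i, f in zip(int_ok, float_ok)]
-- ===== Notes on version B (the rewrite author's own statement) =====
-- stated objective: alternative
-- what changed: Replaces A's per-column decomposition (build a cells list per column, then scan it up to twice via are_ints/are_floats) with a single row-major pass maintaining two boolean possibility arrays, skipping a parse once its flag is dead.
import Mathlib
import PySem

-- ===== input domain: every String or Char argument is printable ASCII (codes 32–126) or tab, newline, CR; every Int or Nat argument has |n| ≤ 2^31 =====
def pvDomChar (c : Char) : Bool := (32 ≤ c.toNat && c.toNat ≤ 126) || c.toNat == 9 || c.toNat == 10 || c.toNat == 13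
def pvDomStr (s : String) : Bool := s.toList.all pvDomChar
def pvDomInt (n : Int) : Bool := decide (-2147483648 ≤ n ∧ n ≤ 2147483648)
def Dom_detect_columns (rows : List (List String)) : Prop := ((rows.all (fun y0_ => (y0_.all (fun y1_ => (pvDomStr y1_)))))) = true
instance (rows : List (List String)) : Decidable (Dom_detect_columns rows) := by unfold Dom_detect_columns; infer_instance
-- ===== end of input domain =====

-- B replaces A's per-column cell-list building and double scan (are_ints then are_floats)
-- with one row-major pass over two boolean possibility arrays; its float() validity check is
-- a DFA run by foldl instead of A's recursive-descent parser. Return value only, no mutation.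


-- ===== PORT A =====
-- Hand port of CPython float(str) VALIDITY (ValueError or not) on ASCII input, recursive-descent
-- style; exact on the stated printable-ASCII domain (checked against CPython): strip whitespace,
-- optional sign, inf/infinity/nan case-insensitively, else digits with single '_' between digits,
-- optional '.part', optional exponent.  Only validity is needed: A never uses the float value.
def pyFloatSpace (c : Char) : Bool :=
  c = ' ' || c = '\t' || c = '\n' || c = '\r' || c.toNat == 11 || c.toNat == 12

-- consume a maximal digit run (single '_' allowed only between digits); caller consumed the first digit
def digRun : List Char → List Char
  | '_' :: c :: rest => if c.isDigit then digRun rest else '_' :: c :: rest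
  | c :: rest => if c.isDigit then digRun rest else c :: rest
  | [] => []

-- one-or-more digits with underscores: none = no leading digit
def parseD? : List Char → Option (List Char)
  | c :: rest => if c.isDigit then some (digRun rest) else none
  | [] => none

-- exponent-or-end: after the mantissa, either nothing or e/E, optional sign, digits to the end
def expEnd : List Char → Bool
  | [] => true
  | c :: rest =>
    if c = 'e' || c = 'E' then
      let rest2 := match rest with
        | d :: r' => if d = '+' || d = '-' then r' else rest
        | [] => rest
      match parseD? rest2 with
      | some [] => true
      | _ => false
    else false

-- mantissa: leftover after int part and optional fraction (none = no valid mantissa)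
def mant1 (cs : List Char) : Option (List Char) :=
  match cs with
  | '.' :: rest => parseD? rest
  | _ =>
    match parseD? cs with
    | none => none
    | some r =>
      match r with
      | '.' :: rest =>
        (match rest with
         | c :: _ => if c.isDigit then parseD? rest else some rest
         | [] => some [])
      | _ => some r

-- mantissa followed by expEnd, on trimmed unsigned chars
def mantExp (cs : List Char) : Bool :=
  match mant1 cs with
  | none => false
  | some r2 => expEnd r2

def floatOkChars (cs0 : List Char) : Bool :=
  let cs1 := cs0.dropWhile pyFloatSpace
  let cs2 := (cs1.reverse.dropWhile pyFloatSpace).reverse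
  let cs := match cs2 with
    | c :: rest => if c = '+' || c = '-' then rest else cs2
    | [] => []
  if cs.map Char.toLower = ['i','n','f'] || cs.map Char.toLower = ['i','n','f','i','n','i','t','y']
      || cs.map Char.toLower = ['n','a','n'] then true
  else mantExp cs

-- are_ints: loop with early return False on ValueError (cells are always str, never None)
def are_ints : List String → Bool
  | [] => true
  | i :: rest =>
    if PySem.Str.len i > 0 ∧ PySem.Int.ofStr? i = none then false else are_ints rest

def are_floats : List String → Bool
  | [] => true
  | i :: rest =>
    if PySem.Str.len i > 0 ∧ floatOkChars i.toList = false then false else are_floats rest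

-- r.getD i "" is exact for r[i]: the comprehension's guard len(r) > i keeps i in range
def detect_columns (rows : List (List String)) : List String :=
  match rows with
  | [] => []
  | r0 :: _ =>
    (List.zipIdx r0).map (fun ih =>
      let i := ih.2
      let cells := (rows.filter (fun r => decide (i < r.length))).map (fun r => r.getD i "")
      if are_ints cells then "integer"
      else if are_floats cells then "numeric"
      else "text")

-- ===== PORT B =====
-- B's hand port of CPython float(str) VALIDITY: the same builtin, ported as a 13-state DFA
-- driven by foldl over the trimmed, sign-stripped characters; exact on the stated ASCII domain.
def isWsB (c : Char) : Bool :=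
  c == ' ' || c == '\t' || c == '\n' || c == '\r' || c == '\x0b' || c == '\x0c'

-- states: 0 start, 1 int digits, 2 after '_' in int, 3 after '.' with int part, 4 after leading '.',
-- 5 fraction digits, 6 after '_' in fraction, 7 after e/E, 9 after exponent sign, 10 exponent digits,
-- 11 after '_' in exponent, 12 dead; accepting: 1, 3, 5, 10
def fstep (s : Nat) (c : Char) : Nat :=
  match s with
  | 0 => if c.isDigit then 1 else if c == '.' then 4 else 12
  | 1 => if c.isDigit then 1 else if c == '_' then 2 else if c == '.' then 3
         else if c == 'e' || c == 'E' then 7 else 12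
  | 2 => if c.isDigit then 1 else 12
  | 3 => if c.isDigit then 5 else if c == 'e' || c == 'E' then 7 else 12
  | 4 => if c.isDigit then 5 else 12
  | 5 => if c.isDigit then 5 else if c == '_' then 6 else if c == 'e' || c == 'E' then 7 else 12
  | 6 => if c.isDigit then 5 else 12
  | 7 => if c.isDigit then 10 else if c == '+' || c == '-' then 9 else 12
  | 9 => if c.isDigit then 10 else 12
  | 10 => if c.isDigit then 10 else if c == '_' then 11 else 12
  | 11 => if c.isDigit then 10 else 12
  | _ => 12

def faccept (s : Nat) : Bool := s == 1 || s == 3 || s == 5 || s == 10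

def floatOkB (cs0 : List Char) : Bool :=
  let cs1 := cs0.dropWhile isWsB
  let cs2 := (cs1.reverse.dropWhile isWsB).reverse
  let cs := match cs2 with
    | c :: rest => if c == '+' || c == '-' then rest else cs2
    | [] => []
  if (cs.map Char.toLower) ∈ [['i','n','f'], ['i','n','f','i','n','i','t','y'], ['n','a','n']]
  then true
  else faccept (cs.foldl fstep 0)

-- one cell of B's inner loop: guarded flag updates (mutation only on the except path)
def stepB (r : List String) (s : List Bool × List Bool) (j : Nat) : List Bool × List Bool :=
  let cell := r.getD j ""   -- exact: j < min(len r, ncols) keeps j in range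
  if PySem.Str.len cell > 0 then
    let s1 := if s.1.getD j true = true ∧ PySem.Int.ofStr? cell = none then s.1.set j false else s.1
    let s2 := if s.2.getD j true = true ∧ floatOkB cell.toList = false then s.2.set j false else s.2
    (s1, s2)
  else s

-- range(min(len(r), ncols)) over a nonnegative bound: List.range, exact
def detect_columns_alt (rows : List (List String)) : List String :=
  match rows with
  | [] => []
  | r0 :: _ =>
    let ncols := r0.length
    let init : List Bool × List Bool := (List.replicate ncols true, List.replicate ncols true)
    let fin := rows.foldl (fun s r => (List.range (min r.length ncols)).foldl (stepB r) s) init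
    List.zipWith (fun i f => if i then "integer" else if f then "numeric" else "text") fin.1 fin.2

-- ===== PRECONDITION & SPEC =====
def Spec_detect_columns (rows : List (List String)) (out : List String) : Prop := out = detect_columns_alt rows
instance (rows : List (List String)) (out : List String) : Decidable (Spec_detect_columns rows out) := by unfold Spec_detect_columns; infer_instance

-- ===== CLAIM (what is proved, stated in full; the proofs are below) =====
def Claim_equal_detect_columns : Prop := ∀ (rows : List (List String)), Dom_detect_columns rows → Spec_detect_columns rows (detect_columns rows)

-- ===== LEMMAS AND PROOFS =====

theorem char_beq_decide (a b : Char) : (a == b) = decide (a = b) := by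
  by_cases h : a = b <;> simp [h]

theorem ws_eq : isWsB = pyFloatSpace := by
  funext c
  have h11 : (c == '\x0b') = (c.toNat == 11) := by
    by_cases h : c = '\x0b'
    · subst h; decide
    · have : c.toNat ≠ 11 := by
        intro hn
        have h2 := Char.ofNat_toNat c
        rw [hn] at h2
        exact h h2.symm
      simp [h, this]
  have h12 : (c == '\x0c') = (c.toNat == 12) := by
    by_cases h : c = '\x0c'
    · subst h; decide
    · have : c.toNat ≠ 12 := by
        intro hn
        have h2 := Char.ofNat_toNat c
        rw [hn] at h2
        exact h h2.symm
      simp [h, this]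
  simp [isWsB, pyFloatSpace, char_beq_decide, h11, h12]

theorem digRun_digit {c : Char} (h : c.isDigit = true) (r : List Char) :
    digRun (c :: r) = digRun r := by
  have hne : c ≠ '_' := by intro e; subst e; simp at h
  cases r with
  | nil => simp [digRun, h]
  | cons x xs =>
    rw [digRun.eq_def]
    split
    all_goals simp_all

theorem digRun_us (c : Char) (r : List Char) :
    digRun ('_' :: c :: r) = if c.isDigit then digRun r else '_' :: c :: r := rfl

theorem digRun_us_nil : digRun ['_'] = ['_'] := by decide

theorem digRun_other {c : Char} (h1 : c.isDigit = false) (h2 : c ≠ '_') (r : List Char) :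
    digRun (c :: r) = c :: r := by
  cases r with
  | nil => simp [digRun, h1]
  | cons x xs =>
    rw [digRun.eq_def]
    split
    all_goals simp_all

-- descent-vocabulary meaning of each DFA state (proof-side ghosts)
def phiExpD (cs : List Char) : Bool := decide (digRun cs = [])

def phiExpSig : List Char → Bool
  | c :: r => if c.isDigit then phiExpD r else false
  | [] => false

def phiExp : List Char → Bool
  | c :: r => if c = '+' || c = '-' then phiExpSig r else phiExpSig (c :: r)
  | [] => false

def phiFrac (cs : List Char) : Bool := expEnd (digRun cs)

def phiDot : List Char → Bool
  | c :: r => if c.isDigit then phiFrac r else false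
  | [] => false

def phiDotAfter : List Char → Bool
  | [] => true
  | c :: r => if c.isDigit then phiFrac r else expEnd (c :: r)

def phiInt (cs : List Char) : Bool :=
  match digRun cs with
  | c :: rest => if c = '.' then phiDotAfter rest else expEnd (c :: rest)
  | [] => true

def phiIntU : List Char → Bool
  | c :: r => if c.isDigit then phiInt r else false
  | [] => false

def phi (s : Nat) (cs : List Char) : Bool :=
  match s with
  | 0 => (match cs with
          | c :: r => if c = '.' then phiDot r else if c.isDigit then phiInt r else false
          | [] => false)
  | 1 => phiInt cs
  | 2 => phiIntU cs
  | 3 => phiDotAfter cs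
  | 4 => phiDot cs
  | 5 => phiFrac cs
  | 6 => phiDot cs
  | 7 => phiExp cs
  | 9 => phiExpSig cs
  | 10 => phiExpD cs
  | 11 => phiExpSig cs
  | _ => false

theorem psig_eq (x : List Char) :
    (match parseD? x with | some [] => true | _ => false) = phiExpSig x := by
  cases x with
  | nil => rfl
  | cons c r =>
    by_cases h : c.isDigit
    · simp only [parseD?, h, if_pos, phiExpSig, phiExpD]
      cases hd : digRun r <;> simp
    · simp [parseD?, h, phiExpSig]

theorem expEnd_cons (c : Char) (rest : List Char) :
    expEnd (c :: rest) = if c = 'e' || c = 'E' then phiExp rest else false := by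
  by_cases he : (decide (c = 'e') || decide (c = 'E')) = true
  · cases rest with
    | nil => simp [expEnd, phiExp, he, parseD?]
    | cons d r' =>
      by_cases hs : (decide (d = '+') || decide (d = '-')) = true
      · simp only [expEnd, he, if_pos, hs, phiExp]
        rw [psig_eq]
      · simp only [expEnd, he, if_pos, hs, phiExp]
        rw [psig_eq]
        simp
  · simp [expEnd, he]

theorem phi_step (s : Nat) (c : Char) (r : List Char) :
    phi s (c :: r) = phi (fstep s c) r := by
  rcases s with _|_|_|_|_|_|_|_|_|_|_|_|s
  · -- state 0
    by_cases hp : c = '.'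
    · subst hp; simp [phi, fstep]
    · by_cases hd : c.isDigit <;> simp [phi, fstep, hp, hd]
  · -- state 1
    by_cases hd : c.isDigit
    · rw [show phi 1 (c :: r) = phiInt (c :: r) from rfl, phiInt, digRun_digit hd]
      simp [fstep, hd, phi, phiInt]
    · have hd' : c.isDigit = false := by simpa using hd
      by_cases hu : c = '_'
      · subst hu
        cases r with
        | nil => simp [phi, fstep, phiInt, digRun_us_nil, phiIntU, expEnd]
        | cons d r' =>
          by_cases hd2 : d.isDigit
          · rw [show phi 1 ('_' :: d :: r') = phiInt ('_' :: d :: r') from rfl, phiInt,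
              digRun_us, if_pos hd2]
            simp [fstep, phi, phiIntU, hd2, phiInt]
          · rw [show phi 1 ('_' :: d :: r') = phiInt ('_' :: d :: r') from rfl, phiInt,
              digRun_us, if_neg (by simpa using hd2)]
            simp [fstep, phi, phiIntU, hd2, expEnd_cons]
      · by_cases hp : c = '.'
        · subst hp
          rw [show phi 1 ('.' :: r) = phiInt ('.' :: r) from rfl, phiInt,
            digRun_other (by decide) (by decide)]
          simp [fstep, phi]
        · rw [show phi 1 (c :: r) = phiInt (c :: r) from rfl, phiInt, digRun_other hd' hu]
          by_cases he : c = 'e' ∨ c = 'E'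
          · simp [fstep, hd', hu, hp, he, phi, expEnd_cons]
          · simp [fstep, hd', hu, hp, he, phi, expEnd_cons]
  · -- state 2
    by_cases hd : c.isDigit <;> simp [phi, fstep, phiIntU, hd]
  · -- state 3
    by_cases hd : c.isDigit
    · simp [phi, fstep, phiDotAfter, hd]
    · by_cases he : c = 'e' ∨ c = 'E'
      · simp [phi, fstep, phiDotAfter, hd, he, expEnd_cons]
      · simp [phi, fstep, phiDotAfter, hd, he, expEnd_cons]
  · -- state 4
    by_cases hd : c.isDigit <;> simp [phi, fstep, phiDot, hd]
  · -- state 5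
    by_cases hd : c.isDigit
    · rw [show phi 5 (c :: r) = phiFrac (c :: r) from rfl, phiFrac, digRun_digit hd]
      simp [fstep, hd, phi, phiFrac]
    · have hd' : c.isDigit = false := by simpa using hd
      by_cases hu : c = '_'
      · subst hu
        cases r with
        | nil => simp [phi, fstep, phiFrac, digRun_us_nil, phiDot, expEnd]
        | cons d r' =>
          by_cases hd2 : d.isDigit
          · rw [show phi 5 ('_' :: d :: r') = phiFrac ('_' :: d :: r') from rfl, phiFrac,
              digRun_us, if_pos hd2]
            simp [fstep, phi, phiDot, hd2, phiFrac]
          · rw [show phi 5 ('_' :: d :: r') = phiFrac ('_' :: d :: r') from rfl, phiFrac,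
              digRun_us, if_neg (by simpa using hd2)]
            simp [fstep, phi, phiDot, hd2, expEnd_cons]
      · rw [show phi 5 (c :: r) = phiFrac (c :: r) from rfl, phiFrac, digRun_other hd' hu]
        by_cases he : c = 'e' ∨ c = 'E'
        · simp [fstep, hd', hu, he, phi, expEnd_cons]
        · simp [fstep, hd', hu, he, phi, expEnd_cons]
  · -- state 6
    by_cases hd : c.isDigit <;> simp [phi, fstep, phiDot, hd]
  · -- state 7
    by_cases hd : c.isDigit
    · have h1 : c ≠ '+' := by intro e; subst e; simp at hd
      have h2 : c ≠ '-' := by intro e; subst e; simp at hd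
      simp [phi, fstep, phiExp, phiExpSig, hd, h1, h2]
    · by_cases hs : c = '+' ∨ c = '-'
      · rcases hs with h | h
        · subst h; simp [phi, fstep, phiExp]
        · subst h; simp [phi, fstep, phiExp]
      · simp [phi, fstep, phiExp, phiExpSig, hd, hs]
  · -- state 8 (unreachable)
    simp [phi, fstep]
  · -- state 9
    by_cases hd : c.isDigit <;> simp [phi, fstep, phiExpSig, hd]
  · -- state 10
    by_cases hd : c.isDigit
    · rw [show phi 10 (c :: r) = phiExpD (c :: r) from rfl, phiExpD, digRun_digit hd]
      simp [fstep, hd, phi, phiExpD]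
    · have hd' : c.isDigit = false := by simpa using hd
      by_cases hu : c = '_'
      · subst hu
        cases r with
        | nil => simp [phi, fstep, phiExpD, digRun_us_nil, phiExpSig]
        | cons d r' =>
          by_cases hd2 : d.isDigit
          · rw [show phi 10 ('_' :: d :: r') = phiExpD ('_' :: d :: r') from rfl, phiExpD,
              digRun_us, if_pos hd2]
            simp [fstep, phi, phiExpSig, hd2, phiExpD]
          · rw [show phi 10 ('_' :: d :: r') = phiExpD ('_' :: d :: r') from rfl, phiExpD,
              digRun_us, if_neg (by simpa using hd2)]
            simp [fstep, phi, phiExpSig, hd2]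
      · rw [show phi 10 (c :: r) = phiExpD (c :: r) from rfl, phiExpD, digRun_other hd' hu]
        simp [fstep, hd', hu, phi]
  · -- state 11
    by_cases hd : c.isDigit <;> simp [phi, fstep, phiExpSig, hd]
  · -- state 12 and beyond
    simp [phi, fstep]

theorem phi_nil_acc (s : Nat) : faccept s = phi s [] := by
  rcases s with _|_|_|_|_|_|_|_|_|_|_|_|s
  all_goals first
    | decide
    | simp [phi, faccept]

theorem run_phi (cs : List Char) : ∀ s : Nat, faccept (cs.foldl fstep s) = phi s cs := by
  induction cs with
  | nil => exact fun s => phi_nil_acc s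
  | cons c r ih => intro s; rw [List.foldl_cons, ih, ← phi_step]

theorem mant1_cons_ne (c : Char) (r : List Char) (hp : c ≠ '.') :
    mant1 (c :: r) =
      (match parseD? (c :: r) with
       | none => none
       | some q =>
         match q with
         | '.' :: rest =>
           (match rest with
            | d :: _ => if d.isDigit then parseD? rest else some rest
            | [] => some [])
         | _ => some q) := by
  rw [mant1.eq_def]
  split
  all_goals simp_all

theorem phiInt_nil (r : List Char) (hq : digRun r = []) : phiInt r = true := by
  rw [phiInt, hq]

theorem phiInt_dot (r qr : List Char) (hq : digRun r = '.' :: qr) : phiInt r = phiDotAfter qr := by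
  rw [phiInt, hq]; simp

theorem phiInt_ne (r : List Char) (q0 : Char) (qr : List Char) (hq : digRun r = q0 :: qr)
    (h : q0 ≠ '.') : phiInt r = expEnd (q0 :: qr) := by
  rw [phiInt, hq]; simp [h]

theorem mantExp_phi0 (cs : List Char) : mantExp cs = phi 0 cs := by
  cases cs with
  | nil => decide
  | cons c r =>
    by_cases hp : c = '.'
    · subst hp
      rw [show mantExp ('.' :: r) = (match parseD? r with | none => false | some r2 => expEnd r2) from rfl]
      cases r with
      | nil => decide
      | cons d r' =>
        by_cases hd : d.isDigit
        · simp [parseD?, hd, phi, phiDot, phiFrac]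
        · simp [parseD?, hd, phi, phiDot]
    · by_cases hd : c.isDigit
      · rw [mantExp, mant1_cons_ne c r hp]
        rw [show parseD? (c :: r) = some (digRun r) from by simp [parseD?, hd]]
        rw [show phi 0 (c :: r) = phiInt r from by simp [phi, hp, hd]]
        cases hq : digRun r with
        | nil => rw [phiInt_nil r hq]; decide
        | cons q0 qr =>
          by_cases hq0 : q0 = '.'
          · subst hq0
            rw [phiInt_dot r qr hq]
            cases qr with
            | nil => decide
            | cons d w =>
              by_cases hd2 : d.isDigit
              · simp [parseD?, hd2, phiDotAfter, phiFrac]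
              · simp [hd2, phiDotAfter]
          · rw [phiInt_ne r q0 qr hq hq0]
            split
            · rename_i heq
              split at heq <;> (try subst_vars) <;> (try split at heq) <;> simp_all
            · rename_i r2 heq
              split at heq <;> (try subst_vars) <;> (try split at heq) <;> simp_all
      · have hd' : c.isDigit = false := by simpa using hd
        rw [mantExp, mant1_cons_ne c r hp]
        simp [parseD?, hd', phi, hp]

theorem tail_eq (cs : List Char) :
    (if (cs.map Char.toLower) ∈ [['i','n','f'], ['i','n','f','i','n','i','t','y'], ['n','a','n']]
     then true else faccept (cs.foldl fstep 0)) =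
    (if cs.map Char.toLower = ['i','n','f'] || cs.map Char.toLower = ['i','n','f','i','n','i','t','y']
        || cs.map Char.toLower = ['n','a','n'] then true else mantExp cs) := by
  by_cases hm : (cs.map Char.toLower) ∈ [['i','n','f'], ['i','n','f','i','n','i','t','y'], ['n','a','n']]
  · rw [if_pos hm]
    simp only [List.mem_cons, List.not_mem_nil, or_false] at hm
    rcases hm with h | h | h <;> simp [h]
  · rw [if_neg hm]
    simp only [List.mem_cons, List.not_mem_nil, or_false, not_or] at hm
    rw [run_phi cs 0, ← mantExp_phi0]
    simp [hm.1, hm.2.1, hm.2.2]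

theorem floatB_eq (cs0 : List Char) : floatOkB cs0 = floatOkChars cs0 := by
  unfold floatOkB floatOkChars
  rw [ws_eq]
  simp only [char_beq_decide]
  exact tail_eq _

-- cell acceptance predicates shared by the two characterizations
def cellIntB (s : String) : Bool := !(decide (PySem.Str.len s > 0) && (PySem.Int.ofStr? s).isNone)
def cellFloatB (s : String) : Bool := !(decide (PySem.Str.len s > 0) && !floatOkB s.toList)

theorem are_ints_eq_all (l : List String) : are_ints l = l.all cellIntB := by
  induction l with
  | nil => rfl
  | cons i rest ih =>
    rw [List.all_cons]
    by_cases h : PySem.Str.len i > 0 ∧ PySem.Int.ofStr? i = none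
    · have h1 : 0 < i.length := by simpa [pysem] using h.1
      have hc : cellIntB i = false := by simp [cellIntB, h1, h.2]
      rw [show are_ints (i :: rest) = false from by rw [are_ints, if_pos h], hc]
      simp
    · have hc : cellIntB i = true := by
        rcases not_and_or.mp h with h1 | h2
        · have h1' : i.length = 0 := by simpa [pysem] using h1
          simp [cellIntB, h1']
        · have hn : (PySem.Int.ofStr? i).isNone = false := by
            cases hh : PySem.Int.ofStr? i
            · exact absurd hh h2
            · rfl
          simp [cellIntB, hn]
      rw [show are_ints (i :: rest) = are_ints rest from by rw [are_ints, if_neg h], hc, ih]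
      simp

theorem are_floats_eq_all (l : List String) : are_floats l = l.all cellFloatB := by
  induction l with
  | nil => rfl
  | cons i rest ih =>
    rw [List.all_cons]
    by_cases h : PySem.Str.len i > 0 ∧ floatOkChars i.toList = false
    · have h1 : 0 < i.length := by simpa [pysem] using h.1
      have hc : cellFloatB i = false := by simp [cellFloatB, h1, floatB_eq, h.2]
      rw [show are_floats (i :: rest) = false from by rw [are_floats, if_pos h], hc]
      simp
    · have hc : cellFloatB i = true := by
        rcases not_and_or.mp h with h1 | h2
        · have h1' : i.length = 0 := by simpa [pysem] using h1
          simp [cellFloatB, h1']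
        · have hf : floatOkChars i.toList = true := by simpa using h2
          simp [cellFloatB, floatB_eq, hf]
      rw [show are_floats (i :: rest) = are_floats rest from by rw [are_floats, if_neg h], hc, ih]
      simp

theorem stepB_len1 (r : List String) (s : List Bool × List Bool) (j : Nat) :
    (stepB r s j).1.length = s.1.length := by
  unfold stepB; dsimp only; split_ifs <;> simp

theorem stepB_len2 (r : List String) (s : List Bool × List Bool) (j : Nat) :
    (stepB r s j).2.length = s.2.length := by
  unfold stepB; dsimp only; split_ifs <;> simp

theorem stepB_getD1 (r : List String) (s : List Bool × List Bool) (j k : Nat)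
    (hj : j < s.1.length) :
    (stepB r s j).1.getD k true =
      if k = j then s.1.getD j true && cellIntB (r.getD j "") else s.1.getD k true := by
  unfold stepB
  set c := r.getD j "" with hcdef
  by_cases hc : PySem.Str.len c > 0
  · rw [if_pos hc]
    dsimp only
    by_cases h1 : s.1.getD j true = true ∧ PySem.Int.ofStr? c = none
    · rw [if_pos h1]
      by_cases hk : k = j
      · subst hk
        have hl : 0 < c.length := by simpa [pysem] using hc
        have hcell : cellIntB c = false := by simp [cellIntB, hl, h1.2]
        rw [if_pos rfl, hcell]
        simp [List.getD, hj]
      · have hk' : j ≠ k := fun e => hk e.symm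
        rw [if_neg hk]
        simp [List.getD, hk']
    · rw [if_neg h1]
      by_cases hk : k = j
      · subst hk
        rw [if_pos rfl]
        rcases not_and_or.mp h1 with h | h
        · have hv : s.1.getD k true = false := by
            cases hvv : s.1.getD k true
            · rfl
            · exact absurd hvv h
          rw [hv]; simp
        · have hn : (PySem.Int.ofStr? c).isNone = false := by
            cases hh : PySem.Int.ofStr? c
            · exact absurd hh h
            · rfl
          simp [cellIntB, hn]
      · rw [if_neg hk]
  · rw [if_neg hc]
    by_cases hk : k = j
    · subst hk
      have hl : c.length = 0 := by simpa [pysem] using hc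
      have hcell : cellIntB c = true := by simp [cellIntB, hl]
      rw [if_pos rfl, hcell]; simp
    · rw [if_neg hk]

theorem stepB_getD2 (r : List String) (s : List Bool × List Bool) (j k : Nat)
    (hj : j < s.2.length) :
    (stepB r s j).2.getD k true =
      if k = j then s.2.getD j true && cellFloatB (r.getD j "") else s.2.getD k true := by
  unfold stepB
  set c := r.getD j "" with hcdef
  by_cases hc : PySem.Str.len c > 0
  · rw [if_pos hc]
    dsimp only
    by_cases h2 : s.2.getD j true = true ∧ floatOkB c.toList = false
    · rw [if_pos h2]
      by_cases hk : k = j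
      · subst hk
        have hl : 0 < c.length := by simpa [pysem] using hc
        have hcell : cellFloatB c = false := by simp [cellFloatB, hl, h2.2]
        rw [if_pos rfl, hcell]
        simp [List.getD, hj]
      · have hk' : j ≠ k := fun e => hk e.symm
        rw [if_neg hk]
        simp [List.getD, hk']
    · rw [if_neg h2]
      by_cases hk : k = j
      · subst hk
        rw [if_pos rfl]
        rcases not_and_or.mp h2 with h | h
        · have hv : s.2.getD k true = false := by
            cases hvv : s.2.getD k true
            · rfl
            · exact absurd hvv h
          rw [hv]; simp
        · have hf : floatOkB (c.toList) = true := by simpa using h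
          simp [cellFloatB, hf]
      · rw [if_neg hk]
  · rw [if_neg hc]
    by_cases hk : k = j
    · subst hk
      have hl : c.length = 0 := by simpa [pysem] using hc
      have hcell : cellFloatB c = true := by simp [cellFloatB, hl]
      rw [if_pos rfl, hcell]; simp
    · rw [if_neg hk]

theorem inner_len (r : List String) (n : Nat) (s : List Bool × List Bool) :
    ((List.range n).foldl (stepB r) s).1.length = s.1.length ∧
    ((List.range n).foldl (stepB r) s).2.length = s.2.length := by
  induction n generalizing s with
  | zero => simp
  | succ n ih =>
    rw [List.range_succ, List.foldl_append]
    simp only [List.foldl_cons, List.foldl_nil]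
    refine ⟨?_, ?_⟩
    · rw [stepB_len1]; exact (ih s).1
    · rw [stepB_len2]; exact (ih s).2

theorem inner_getD (r : List String) (n : Nat) (s : List Bool × List Bool)
    (hn1 : n ≤ s.1.length) (hn2 : n ≤ s.2.length) (k : Nat) :
    ((List.range n).foldl (stepB r) s).1.getD k true =
      (s.1.getD k true && (if k < n then cellIntB (r.getD k "") else true)) ∧
    ((List.range n).foldl (stepB r) s).2.getD k true =
      (s.2.getD k true && (if k < n then cellFloatB (r.getD k "") else true)) := by
  induction n generalizing k with
  | zero => simp
  | succ n ih =>
    rw [List.range_succ, List.foldl_append]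
    simp only [List.foldl_cons, List.foldl_nil]
    have hlen := inner_len r n s
    have h1 := stepB_getD1 r ((List.range n).foldl (stepB r) s) n k (by omega)
    have h2 := stepB_getD2 r ((List.range n).foldl (stepB r) s) n k (by omega)
    have t := ih (by omega) (by omega) k
    by_cases hk : k = n
    · subst hk
      rw [h1, if_pos rfl, h2, if_pos rfl, t.1, t.2,
        if_neg (Nat.lt_irrefl k), if_neg (Nat.lt_irrefl k),
        if_pos (Nat.lt_succ_self k), if_pos (Nat.lt_succ_self k)]
      simp
    · have hiff : k < n + 1 ↔ k < n := by omega
      rw [h1, if_neg hk, h2, if_neg hk, t.1, t.2,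
        if_congr hiff rfl rfl, if_congr hiff rfl rfl]
      exact ⟨rfl, rfl⟩

-- outer loop characterization: a flag at k is the conjunction of the cell checks over all rows
theorem outer_getD (L : Nat) (rs : List (List String)) (s : List Bool × List Bool)
    (hL1 : s.1.length = L) (hL2 : s.2.length = L) (k : Nat) :
    ((rs.foldl (fun s r => (List.range (min r.length L)).foldl (stepB r) s) s).1.getD k true =
      (s.1.getD k true && rs.all (fun r => !(decide (k < min r.length L)) || cellIntB (r.getD k "")))) ∧
    ((rs.foldl (fun s r => (List.range (min r.length L)).foldl (stepB r) s) s).2.getD k true =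
      (s.2.getD k true && rs.all (fun r => !(decide (k < min r.length L)) || cellFloatB (r.getD k "")))) ∧
    ((rs.foldl (fun s r => (List.range (min r.length L)).foldl (stepB r) s) s).1.length = L ∧
     (rs.foldl (fun s r => (List.range (min r.length L)).foldl (stepB r) s) s).2.length = L) := by
  induction rs generalizing s with
  | nil => simp [hL1, hL2]
  | cons r rest ih =>
    simp only [List.foldl_cons, List.all_cons]
    have hlen := inner_len r (min r.length L) s
    have hstep := inner_getD r (min r.length L) s (by omega) (by omega) k
    have := ih ((List.range (min r.length L)).foldl (stepB r) s) (by omega) (by omega)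
    refine ⟨?_, ?_, this.2.2⟩
    · rw [this.1, hstep.1]
      by_cases hk : k < min r.length L <;> simp [hk, Bool.and_assoc]
    · rw [this.2.1, hstep.2]
      by_cases hk : k < min r.length L <;> simp [hk, Bool.and_assoc]

theorem detect_columns_spec_aux (r0 : List String) (rest : List (List String)) :
    detect_columns (r0 :: rest) = detect_columns_alt (r0 :: rest) := by
  unfold detect_columns detect_columns_alt
  dsimp only
  have hout := fun k => outer_getD r0.length (r0 :: rest)
    (List.replicate r0.length true, List.replicate r0.length true) (by simp) (by simp) k
  set F := (r0 :: rest).foldl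
      (fun s r => (List.range (min r.length r0.length)).foldl (stepB r) s)
      (List.replicate r0.length true, List.replicate r0.length true) with hF
  have hlen1 : F.1.length = r0.length := (hout 0).2.2.1
  have hlen2 : F.2.length = r0.length := (hout 0).2.2.2
  apply List.ext_getElem
  · rw [List.length_map, List.length_zipIdx, List.length_zipWith, hlen1, hlen2]
    omega
  · intro i hi1 hi2
    have hiL : i < r0.length := by
      rw [List.length_map, List.length_zipIdx] at hi1
      exact hi1
    rw [List.getElem_map, List.getElem_zipWith, List.getElem_zipIdx]
    dsimp only
    have hgd1 : F.1.getD i true =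
        (r0 :: rest).all (fun r => !(decide (i < min r.length r0.length)) || cellIntB (r.getD i "")) := by
      rw [(hout i).1]
      simp [List.getD, hiL]
    have hgd2 : F.2.getD i true =
        (r0 :: rest).all (fun r => !(decide (i < min r.length r0.length)) || cellFloatB (r.getD i "")) := by
      rw [(hout i).2.1]
      simp [List.getD, hiL]
    have hmin : ∀ r : List String, (decide (i < min r.length r0.length)) = decide (i < r.length) := by
      intro r
      by_cases h : i < r.length <;> simp [h, hiL]
    have hA1 : are_ints (((r0 :: rest).filter (fun r => decide (i < r.length))).map (fun r => r.getD i "")) =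
        (r0 :: rest).all (fun r => !(decide (i < min r.length r0.length)) || cellIntB (r.getD i "")) := by
      rw [are_ints_eq_all]
      simp only [List.all_map, List.all_filter, Function.comp]
      congr 1
      funext r
      rw [hmin r]
    have hA2 : are_floats (((r0 :: rest).filter (fun r => decide (i < r.length))).map (fun r => r.getD i "")) =
        (r0 :: rest).all (fun r => !(decide (i < min r.length r0.length)) || cellFloatB (r.getD i "")) := by
      rw [are_floats_eq_all]
      simp only [List.all_map, List.all_filter, Function.comp]
      congr 1
      funext r
      rw [hmin r]
    have e1 : F.1[i]'(by omega) =
        are_ints (((r0 :: rest).filter (fun r => decide (i < r.length))).map (fun r => r.getD i "")) := by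
      rw [hA1, ← hgd1]
      rw [List.getD, List.getElem?_eq_getElem (by omega)]
      rfl
    have e2 : F.2[i]'(by omega) =
        are_floats (((r0 :: rest).filter (fun r => decide (i < r.length))).map (fun r => r.getD i "")) := by
      rw [hA2, ← hgd2]
      rw [List.getD, List.getElem?_eq_getElem (by omega)]
      rfl
    rw [e1, e2]
    simp only [Nat.zero_add]

-- ===== VERDICT (by name: the statement is the Claim_ definition above) =====
theorem detect_columns_spec : Claim_equal_detect_columns := by
  intro rows _
  unfold Spec_detect_columns
  match rows with
  | [] => rfl
  | r0 :: rest => exact detect_columns_spec_aux r0 rest
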